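-- pv_equiv track=rewrite | github.com/dudqls10-glitch/self_detection_raw | scripts/worst/train_mlp_v_delta.py | describe_input_config
-- ===== SOURCE A (Python) =====
-- CHANNEL_NAMES = [f"raw{i}" for i in range(1, 9)]
--
-- def describe_input_config(use_vel, use_prev_sensor, prev_sensor_indices):
--     if not use_vel and not use_prev_sensor:
--         return "joints only"
--     if use_vel and not use_prev_sensor:
--         return "joints + velocity"
--     if not use_vel and use_prev_sensor:
--         selected = [CHANNEL_NAMES[idx] for idx in prev_sensor_indices]
--         return "joints + previous sensors (" + ", ".join(selected) + ")"
--     selected = [CHANNEL_NAMES[idx] for idx in prev_sensor_indices]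
--     if len(selected) == len(CHANNEL_NAMES):
--         return "joints + velocity + previous sensors"
--     return "joints + velocity + previous sensors (" + ", ".join(selected) + ")"
-- ===== SOURCE B (Python) =====
-- CHANNEL_NAMES = [f"raw{i}" for i in range(1, 9)]
--
-- def describe_input_config(use_vel, use_prev_sensor, prev_sensor_indices):
--     parts = ["joints"]
--     if use_vel:
--         parts.append("velocity")
--     if use_prev_sensor:
--         if use_vel and len(prev_sensor_indices) == len(CHANNEL_NAMES):
--             parts.append("previous sensors")
--         else:
--             names = ", ".join(CHANNEL_NAMES[idx] for idx in prev_sensor_indices)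
--             parts.append("previous sensors (" + names + ")")
--     if len(parts) == 1:
--         return "joints only"
--     return " + ".join(parts)
-- ===== Notes on version B (the rewrite author's own statement) =====
-- stated objective: simpler
-- what changed: Replaces the four-way case enumeration with one incremental accumulation of name parts joined by ' + ', keeping the suppression of the channel list only when velocity is on and all 8 indices are given.
import Mathlib
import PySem

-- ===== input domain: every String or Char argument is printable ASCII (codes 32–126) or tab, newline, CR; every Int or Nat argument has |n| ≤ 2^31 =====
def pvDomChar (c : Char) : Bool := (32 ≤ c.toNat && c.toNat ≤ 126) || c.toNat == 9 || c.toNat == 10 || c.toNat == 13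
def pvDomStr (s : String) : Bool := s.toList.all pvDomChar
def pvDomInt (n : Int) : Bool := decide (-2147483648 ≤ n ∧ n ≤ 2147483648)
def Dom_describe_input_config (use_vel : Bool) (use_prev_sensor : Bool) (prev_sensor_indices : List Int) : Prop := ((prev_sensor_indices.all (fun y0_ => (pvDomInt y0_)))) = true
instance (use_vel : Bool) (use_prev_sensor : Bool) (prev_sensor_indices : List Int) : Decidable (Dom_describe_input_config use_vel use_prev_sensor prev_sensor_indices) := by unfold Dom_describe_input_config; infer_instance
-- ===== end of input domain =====

-- B builds the description by accumulating parts and joining with " + " instead of enumerating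
-- A's four cases; objective: simpler. Same return value on every input admitted by Pre_.

-- ===== PORT A =====
-- CHANNEL_NAMES = [f"raw{i}" for i in range(1, 9)]  (shared module constant)
def CHANNEL_NAMES : List String :=
  (PySem.List.pyRange 1 9 1).map (fun i => PySem.Str.join "" ["raw", PySem.Int.toStr i])

def describe_input_config (use_vel : Bool) (use_prev_sensor : Bool) (prev_sensor_indices : List Int) : String :=
  if !use_vel && !use_prev_sensor then "joints only"
  else if use_vel && !use_prev_sensor then "joints + velocity"
  else if !use_vel && use_prev_sensor then
    -- CHANNEL_NAMES[idx]: pyGetD, exact under Pre_ (out-of-range raises IndexError, excluded)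
    let selected := prev_sensor_indices.map (fun idx => PySem.List.pyGetD CHANNEL_NAMES idx "")
    PySem.Str.join "" ["joints + previous sensors (", PySem.Str.join ", " selected, ")"]
  else
    let selected := prev_sensor_indices.map (fun idx => PySem.List.pyGetD CHANNEL_NAMES idx "")
    if selected.length = CHANNEL_NAMES.length then "joints + velocity + previous sensors"
    else PySem.Str.join "" ["joints + velocity + previous sensors (", PySem.Str.join ", " selected, ")"]

-- ===== PORT B =====
def describe_input_config_alt (use_vel : Bool) (use_prev_sensor : Bool) (prev_sensor_indices : List Int) : String :=
  let parts := ["joints"]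
  let parts := if use_vel then parts ++ ["velocity"] else parts
  let parts :=
    if use_prev_sensor then
      if use_vel && decide (prev_sensor_indices.length = CHANNEL_NAMES.length) then
        parts ++ ["previous sensors"]
      else
        let names := PySem.Str.join ", "
          (prev_sensor_indices.map (fun idx => PySem.List.pyGetD CHANNEL_NAMES idx ""))
        parts ++ [PySem.Str.join "" ["previous sensors (", names, ")"]]
    else parts
  if parts.length = 1 then "joints only" else PySem.Str.join " + " parts

-- ===== PRECONDITION & SPEC =====
-- Pre_ excludes exactly the inputs where A raises IndexError: when use_prev_sensor is set,
-- every index must be a valid Python index into the 8-element CHANNEL_NAMES list.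
def Pre_describe_input_config (use_vel : Bool) (use_prev_sensor : Bool) (prev_sensor_indices : List Int) : Prop :=
  use_prev_sensor = true → ∀ idx ∈ prev_sensor_indices, PySem.Raise.InRange 8 idx
instance (use_vel : Bool) (use_prev_sensor : Bool) (prev_sensor_indices : List Int) : Decidable (Pre_describe_input_config use_vel use_prev_sensor prev_sensor_indices) := by unfold Pre_describe_input_config; infer_instance

def pvWitness_describe_input_config : Bool × Bool × List Int := (true, true, [0, -1, 3])

def Spec_describe_input_config (use_vel : Bool) (use_prev_sensor : Bool) (prev_sensor_indices : List Int) (out : String) : Prop := out = describe_input_config_alt use_vel use_prev_sensor prev_sensor_indices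
instance (use_vel : Bool) (use_prev_sensor : Bool) (prev_sensor_indices : List Int) (out : String) : Decidable (Spec_describe_input_config use_vel use_prev_sensor prev_sensor_indices out) := by unfold Spec_describe_input_config; infer_instance

-- ===== CLAIM (what is proved, stated in full; the proofs are below) =====
def Claim_equal_describe_input_config : Prop := ∀ (use_vel : Bool) (use_prev_sensor : Bool) (prev_sensor_indices : List Int), Dom_describe_input_config use_vel use_prev_sensor prev_sensor_indices → Pre_describe_input_config use_vel use_prev_sensor prev_sensor_indices → Spec_describe_input_config use_vel use_prev_sensor prev_sensor_indices (describe_input_config use_vel use_prev_sensor prev_sensor_indices)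

-- ===== LEMMAS AND PROOFS =====

-- ===== VERDICT (by name: the statement is the Claim_ definition above) =====
theorem describe_input_config_spec : Claim_equal_describe_input_config := by
  intro uv up ps _ _
  unfold Spec_describe_input_config describe_input_config describe_input_config_alt
  cases uv <;> cases up <;> simp <;>
    try split
  all_goals
    apply String.toList_inj.mp
    simp [PySem.Str.toList_join, PySem.Chars.join_cons_cons, PySem.Chars.join_singleton]
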